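-- pv_equiv track=rewrite | github.com/atsidaev/cyrillic-fonts-recognition | Preprocessing/Contours/BrightnessAnalisys.py | get_local_mins
-- ===== SOURCE A (Python) =====
-- def get_local_mins(brighness, partlength):
--     i = 0
--     n = len(brighness)
--     local_mins = []
--     while(i <= n):
--         if i+partlength < len(brighness):
--             d = brighness[i:i+partlength]
--             k = d.index(min(d))
--             local_mins.append((i+k,brighness[i+k]))
--             i = i+k+1
--         else: break
--     return local_mins
-- ===== SOURCE B (Python) =====
-- def get_local_mins(brighness, partlength):
--     # Block-decomposition RMQ: O(n) precompute of per-block prefix/suffix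
--     # leftmost-argmin tables, then each greedy window query is O(1).
--     n = len(brighness)
--     if partlength < 1 or partlength >= n:
--         return []
--     p = partlength
--     suf = [0] * n
--     for i in range(n - 1, -1, -1):
--         if i % p == p - 1 or i == n - 1:
--             suf[i] = i
--         else:
--             j = suf[i + 1]
--             suf[i] = i if brighness[i] <= brighness[j] else j
--     pre = [0] * n
--     for i in range(n):
--         if i % p == 0:
--             pre[i] = i
--         else:
--             j = pre[i - 1]
--             pre[i] = j if brighness[j] <= brighness[i] else i
--     res = []
--     i = 0
--     while i + p < n:
--         m = suf[i]
--         c = pre[i + p - 1]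
--         if brighness[c] < brighness[m]:
--             m = c
--         res.append((m, brighness[m]))
--         i = m + 1
--     return res
-- ===== Notes on version B (the rewrite author's own statement) =====
-- stated objective: faster
-- what changed: A rescans each window with min()+list.index() (O(partlength) per step); B precomputes per-block prefix/suffix leftmost-argmin tables once (block-decomposition RMQ) and answers each greedy window query in O(1).
import Mathlib
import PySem

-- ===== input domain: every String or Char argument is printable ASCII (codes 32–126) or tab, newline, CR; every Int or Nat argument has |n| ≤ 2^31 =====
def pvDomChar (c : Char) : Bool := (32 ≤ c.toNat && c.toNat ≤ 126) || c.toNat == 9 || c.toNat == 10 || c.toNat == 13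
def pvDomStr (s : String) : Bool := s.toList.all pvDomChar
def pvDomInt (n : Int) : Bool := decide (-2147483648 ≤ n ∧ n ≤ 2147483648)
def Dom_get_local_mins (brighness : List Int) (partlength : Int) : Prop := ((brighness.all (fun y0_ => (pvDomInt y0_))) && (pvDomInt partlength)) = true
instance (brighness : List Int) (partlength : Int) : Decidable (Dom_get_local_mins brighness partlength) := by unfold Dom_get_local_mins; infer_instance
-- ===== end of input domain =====

-- B replaces A's O(n·partlength) rescan of each window by an O(n) block-decomposition
-- RMQ (per-block prefix/suffix leftmost-argmin tables, O(1) per window query).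

-- ===== PORT A =====
-- while(i <= n): if i+partlength < len: d = b[i:i+partlength]; k = d.index(min(d)); append; i = i+k+1 else break
-- fuel = len+1 bounds the iteration count (i strictly increases, loop requires i ≤ n).
def get_local_mins_loopA (b : List Int) (p : Int) : Nat → Int → List (Int × Int) → List (Int × Int)
  | 0, _, acc => acc
  | fuel+1, i, acc =>
    if i ≤ (b.length : Int) then
      if i + p < (b.length : Int) then
        let d := PySem.List.slice b (some i) (some (i + p))
        match PySem.List.min? d (fun x => x) with
        | none => acc          -- min([]) raises ValueError: outside Pre_
        | some v =>
          match PySem.List.index? d v with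
          | none => acc        -- unreachable (v ∈ d)
          | some k =>
            match PySem.List.pyGet? b (i + (k : Int)) with
            | none => acc      -- unreachable under Pre_
            | some bv => get_local_mins_loopA b p fuel (i + (k : Int) + 1) (acc ++ [(i + (k : Int), bv)])
      else acc
    else acc

def get_local_mins (brighness : List Int) (partlength : Int) : List (Int × Int) :=
  get_local_mins_loopA brighness partlength (brighness.length + 1) 0 []

-- ===== PORT B =====
-- suf[i] : leftmost argmin of b on [i, end of i's block of size p) (Python's backward loop, as a recurrence)
def bSuf (b : List Int) (p : Nat) (i : Nat) : Nat :=
  if h : i % p = p - 1 ∨ b.length ≤ i + 1 then i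
  else
    let j := bSuf b p (i + 1)
    if b.getD i 0 ≤ b.getD j 0 then i else j
termination_by b.length - i
decreasing_by simp only [not_or, Nat.not_le] at h; omega

-- pre[i] : leftmost argmin of b on [start of i's block, i] (Python's forward loop)
def bPre (b : List Int) (p : Nat) : Nat → Nat
  | 0 => 0
  | i+1 =>
    if (i+1) % p = 0 then i+1
    else
      let j := bPre b p i
      if b.getD j 0 ≤ b.getD (i+1) 0 then j else i+1

-- while i + p < n: m = suf[i]; c = pre[i+p-1]; if b[c] < b[m]: m = c; append (m, b[m]); i = m+1
def bLoop (b : List Int) (p : Nat) : Nat → Nat → List (Int × Int) → List (Int × Int)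
  | 0, _, acc => acc
  | fuel+1, i, acc =>
    if i + p < b.length then
      let m0 := bSuf b p i
      let c := bPre b p (i + p - 1)
      let m := if b.getD c 0 < b.getD m0 0 then c else m0
      bLoop b p fuel (m + 1) (acc ++ [((m : Int), b.getD m 0)])
    else acc

def get_local_mins_alt (brighness : List Int) (partlength : Int) : List (Int × Int) :=
  if partlength < 1 ∨ (brighness.length : Int) ≤ partlength then []
  else bLoop brighness partlength.toNat brighness.length 0 []

-- ===== PRECONDITION & SPEC =====
-- Pre_ excludes exactly the inputs where A raises ValueError (min of an empty window):
-- partlength ≤ 0 while partlength < len(brighness).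
def Pre_get_local_mins (brighness : List Int) (partlength : Int) : Prop :=
  1 ≤ partlength ∨ (brighness.length : Int) ≤ partlength
instance (brighness : List Int) (partlength : Int) : Decidable (Pre_get_local_mins brighness partlength) := by unfold Pre_get_local_mins; infer_instance

def pvWitness_get_local_mins : List Int × Int := ([5, 3, 4, 1, 2], 2)

def Spec_get_local_mins (brighness : List Int) (partlength : Int) (out : List (Int × Int)) : Prop := out = get_local_mins_alt brighness partlength
instance (brighness : List Int) (partlength : Int) (out : List (Int × Int)) : Decidable (Spec_get_local_mins brighness partlength out) := by unfold Spec_get_local_mins; infer_instance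

-- ===== CLAIM (what is proved, stated in full; the proofs are below) =====
def Claim_equal_get_local_mins : Prop := ∀ (brighness : List Int) (partlength : Int), Dom_get_local_mins brighness partlength → Pre_get_local_mins brighness partlength → Spec_get_local_mins brighness partlength (get_local_mins brighness partlength)


-- ===== LEMMAS AND PROOFS =====

-- Reference: leftmost argmin of f on [lo, lo+len)
def amin (f : Nat → Int) (lo : Nat) : Nat → Nat
  | 0 => lo
  | 1 => lo
  | n+2 => let j := amin f (lo+1) (n+1); if f lo ≤ f j then lo else j

theorem amin_lb (f : Nat → Int) : ∀ (len lo : Nat), lo ≤ amin f lo len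
  | 0, lo => le_refl _
  | 1, lo => le_refl _
  | n+2, lo => by
    have ih := amin_lb f (n+1) (lo+1)
    simp only [amin]
    split <;> omega

theorem amin_ub (f : Nat → Int) : ∀ (len lo : Nat), 1 ≤ len → amin f lo len < lo + len
  | 0, _, h => absurd h (by omega)
  | 1, lo, _ => by simp [amin]
  | n+2, lo, _ => by
    have ih := amin_ub f (n+1) (lo+1) (by omega)
    simp only [amin]
    split <;> omega

theorem amin_min (f : Nat → Int) : ∀ (len lo t : Nat), lo ≤ t → t < lo + len → f (amin f lo len) ≤ f t
  | 0, lo, t, h1, h2 => absurd h2 (by omega)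
  | 1, lo, t, h1, h2 => by
    have : t = lo := by omega
    subst this; exact le_refl _
  | n+2, lo, t, h1, h2 => by
    have ih := amin_min f (n+1) (lo+1)
    simp only [amin]
    by_cases hc : f lo ≤ f (amin f (lo+1) (n+1))
    · rw [if_pos hc]
      rcases Nat.eq_or_lt_of_le h1 with he | hlt
      · subst he; exact le_refl _
      · exact le_trans hc (ih t (by omega) (by omega))
    · rw [if_neg hc]
      rcases Nat.eq_or_lt_of_le h1 with he | hlt
      · subst he; omega
      · exact ih t (by omega) (by omega)

theorem amin_left (f : Nat → Int) : ∀ (len lo t : Nat), lo ≤ t → t < amin f lo len → f (amin f lo len) < f t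
  | 0, lo, t, h1, h2 => by simp only [amin] at h2; omega
  | 1, lo, t, h1, h2 => by simp only [amin] at h2; omega
  | n+2, lo, t, h1, h2 => by
    have ih := amin_left f (n+1) (lo+1)
    simp only [amin] at h2 ⊢
    by_cases hc : f lo ≤ f (amin f (lo+1) (n+1))
    · rw [if_pos hc]; rw [if_pos hc] at h2; omega
    · rw [if_neg hc]; rw [if_neg hc] at h2
      rcases Nat.eq_or_lt_of_le h1 with he | hlt
      · subst he; omega
      · exact ih t (by omega) h2

theorem amin_unique (f : Nat → Int) (len lo j : Nat) (hlen : 1 ≤ len)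
    (h1 : lo ≤ j) (h2 : j < lo + len)
    (hmin : ∀ t, lo ≤ t → t < lo + len → f j ≤ f t)
    (hleft : ∀ t, lo ≤ t → t < j → f j < f t) : j = amin f lo len := by
  have ha1 := amin_lb f len lo
  have ha2 := amin_ub f len lo hlen
  have hja : f j ≤ f (amin f lo len) := hmin _ ha1 ha2
  have haj : f (amin f lo len) ≤ f j := amin_min f len lo j h1 h2
  rcases lt_trichotomy j (amin f lo len) with hlt | he | hgt
  · have := amin_left f len lo j h1 hlt; omega
  · exact he
  · have := hleft _ ha1 hgt; omega

theorem amin_snoc (f : Nat → Int) (len lo : Nat) (h : 1 ≤ len) :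
    amin f lo (len+1) = if f (amin f lo len) ≤ f (lo + len) then amin f lo len else lo + len := by
  symm
  by_cases hc : f (amin f lo len) ≤ f (lo + len)
  · rw [if_pos hc]
    refine amin_unique f (len+1) lo _ (by omega) (amin_lb f len lo)
      (by have := amin_ub f len lo h; omega) ?_ ?_
    · intro t ht1 ht2
      by_cases he : t = lo + len
      · subst he; exact hc
      · exact amin_min f len lo t ht1 (by omega)
    · intro t ht1 ht2
      exact amin_left f len lo t ht1 ht2
  · rw [if_neg hc]
    refine amin_unique f (len+1) lo _ (by omega) (by omega) (by omega) ?_ ?_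
    · intro t ht1 ht2
      by_cases he : t = lo + len
      · subst he; exact le_refl _
      · have := amin_min f len lo t ht1 (by omega); omega
    · intro t ht1 ht2
      have := amin_min f len lo t ht1 (by omega); omega

theorem amin_combine (f : Nat → Int) (lo s len : Nat) (h1 : 1 ≤ s) (h2 : s < len) :
    (if f (amin f (lo+s) (len-s)) < f (amin f lo s) then amin f (lo+s) (len-s) else amin f lo s)
      = amin f lo len := by
  have ha1 := amin_lb f s lo
  have ha2 := amin_ub f s lo h1
  have hc1 := amin_lb f (len-s) (lo+s)
  have hc2 := amin_ub f (len-s) (lo+s) (by omega)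
  by_cases hc : f (amin f (lo+s) (len-s)) < f (amin f lo s)
  · rw [if_pos hc]
    refine amin_unique f len lo _ (by omega) (by omega) (by omega) ?_ ?_
    · intro t ht1 ht2
      by_cases hts : t < lo + s
      · have := amin_min f s lo t ht1 hts; omega
      · exact amin_min f (len-s) (lo+s) t (by omega) (by omega)
    · intro t ht1 ht2
      by_cases hts : t < lo + s
      · have := amin_min f s lo t ht1 hts; omega
      · exact amin_left f (len-s) (lo+s) t (by omega) ht2
  · rw [if_neg hc]
    refine amin_unique f len lo _ (by omega) ha1 (by omega) ?_ ?_
    · intro t ht1 ht2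
      by_cases hts : t < lo + s
      · exact amin_min f s lo t ht1 hts
      · have := amin_min f (len-s) (lo+s) t (by omega) (by omega); omega
    · intro t ht1 ht2
      exact amin_left f s lo t ht1 ht2

-- mod arithmetic helpers (p is a variable, so omega alone cannot do these)
theorem mod_succ_of_ne (p i : Nat) (hp : 1 ≤ p) (h : i % p ≠ p - 1) : (i+1) % p = i % p + 1 := by
  have hlt : i % p < p := Nat.mod_lt _ (by omega)
  have hq := Nat.div_add_mod i p
  have he : i + 1 = p * (i / p) + (i % p + 1) := by omega
  rw [he, Nat.mul_add_mod]
  exact Nat.mod_eq_of_lt (by omega)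

theorem mod_succ_of_eq (p i : Nat) (hp : 1 ≤ p) (h : i % p = p - 1) : (i+1) % p = 0 := by
  have hq := Nat.div_add_mod i p
  have hmul : p * (i / p + 1) = p * (i / p) + p := by ring
  have he : i + 1 = p * (i / p + 1) + 0 := by omega
  rw [he, Nat.mul_add_mod]
  exact Nat.zero_mod p

theorem bSuf_eq (b : List Int) (p : Nat) (hp : 1 ≤ p) :
    ∀ i, i < b.length →
      bSuf b p i = amin (fun t => b.getD t 0) i (min (p - i % p) (b.length - i))
  | i, hi => by
    have hlt : i % p < p := Nat.mod_lt _ (by omega)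
    rw [bSuf]
    by_cases h : i % p = p - 1 ∨ b.length ≤ i + 1
    · rw [dif_pos h]
      have hm : min (p - i % p) (b.length - i) = 1 := by omega
      rw [hm]
      simp [amin]
    · rw [dif_neg h]
      simp only [not_or, Nat.not_le] at h
      have hi1 : i + 1 < b.length := by omega
      have ih := bSuf_eq b p hp (i+1) hi1
      have hmod : (i+1) % p = i % p + 1 := mod_succ_of_ne p i hp h.1
      obtain ⟨M, hM⟩ : ∃ M, min (p - (i+1) % p) (b.length - (i+1)) = M + 1 :=
        ⟨min (p - (i+1) % p) (b.length - (i+1)) - 1, by omega⟩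
      have hmin2 : min (p - i % p) (b.length - i) = M + 2 := by omega
      rw [hmin2, ih, hM]
      simp only [amin]
  termination_by i => b.length - i
  decreasing_by simp only [not_or, Nat.not_le] at h; omega

theorem bPre_eq (b : List Int) (p : Nat) (hp : 1 ≤ p) :
    ∀ i, bPre b p i = amin (fun t => b.getD t 0) (i - i % p) (i % p + 1)
  | 0 => by simp [bPre, amin]
  | i+1 => by
    have hlt : i % p < p := Nat.mod_lt _ (by omega)
    simp only [bPre]
    by_cases h : (i+1) % p = 0
    · rw [if_pos h, h]
      simp [amin]
    · rw [if_neg h]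
      have hle : i % p ≤ i := Nat.mod_le i p
      have hr : i % p ≠ p - 1 := fun he => h (mod_succ_of_eq p i hp he)
      have hmod : (i+1) % p = i % p + 1 := mod_succ_of_ne p i hp hr
      have ih := bPre_eq b p hp i
      rw [ih, hmod]
      have hs := amin_snoc (fun t => b.getD t 0) (i % p + 1) (i - i % p) (by omega)
      have e1 : i - i % p + (i % p + 1) = i + 1 := by omega
      have e2 : i + 1 - (i % p + 1) = i - i % p := by omega
      rw [e1] at hs
      rw [e2, hs]

-- B's O(1) window query equals the leftmost argmin of the window
theorem bStep (b : List Int) (p : Nat) (hp : 1 ≤ p) (i : Nat) (hw : i + p < b.length) :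
    (if b.getD (bPre b p (i + p - 1)) 0 < b.getD (bSuf b p i) 0
       then bPre b p (i + p - 1) else bSuf b p i)
      = amin (fun t => b.getD t 0) i p := by
  have hlt : i % p < p := Nat.mod_lt _ (by omega)
  have hle : i % p ≤ i := Nat.mod_le i p
  have hq := Nat.div_add_mod i p
  have hmul : p * (i / p + 1) = p * (i / p) + p := by ring
  have hsuf : bSuf b p i = amin (fun t => b.getD t 0) i (p - i % p) := by
    rw [bSuf_eq b p hp i (by omega)]
    congr 1
    omega
  by_cases hr : i % p = 0
  · have hmod : (i + p - 1) % p = p - 1 := by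
      have he : i + p - 1 = p * (i / p) + (p - 1) := by omega
      rw [he, Nat.mul_add_mod]
      exact Nat.mod_eq_of_lt (by omega)
    have hpre : bPre b p (i + p - 1) = amin (fun t => b.getD t 0) i p := by
      rw [bPre_eq b p hp, hmod]
      congr 1 <;> omega
    have hsuf' : bSuf b p i = amin (fun t => b.getD t 0) i p := by
      rw [hsuf]; congr 1; omega
    rw [hpre, hsuf']
    rw [if_neg (lt_irrefl _)]
  · have hmod : (i + p - 1) % p = i % p - 1 := by
      have he : i + p - 1 = p * (i / p + 1) + (i % p - 1) := by omega
      rw [he, Nat.mul_add_mod]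
      exact Nat.mod_eq_of_lt (by omega)
    have hpre : bPre b p (i + p - 1) = amin (fun t => b.getD t 0) (i + (p - i % p)) (p - (p - i % p)) := by
      rw [bPre_eq b p hp, hmod]
      congr 1 <;> omega
    have hc := amin_combine (fun t => b.getD t 0) i (p - i % p) p (by omega) (by omega)
    rw [hpre, hsuf]
    exact hc

-- A's scan of the window (min then index) lands on the same leftmost argmin
theorem aStep (b : List Int) (p : Int) (hp : 1 ≤ p) (i : Nat) (hw : (i : Int) + p < (b.length : Int)) :
    ∃ v k, PySem.List.min? (PySem.List.slice b (some (i : Int)) (some ((i : Int) + p))) (fun x => x) = some v ∧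
      PySem.List.index? (PySem.List.slice b (some (i : Int)) (some ((i : Int) + p))) v = some k ∧
      i + k = amin (fun t => b.getD t 0) i p.toNat ∧
      PySem.List.pyGet? b ((i : Int) + (k : Int)) = some (b.getD (i + k) 0) := by
  have hP : ((p.toNat : Int)) = p := Int.toNat_of_nonneg (by omega)
  have hiP : i + p.toNat < b.length := by omega
  have hd : PySem.List.slice b (some (i : Int)) (some ((i : Int) + p)) = (b.drop i).take p.toNat := by
    rw [← hP]
    exact_mod_cast PySem.List.slice_natCast_add b i p.toNat
  have hdlen : ((b.drop i).take p.toNat).length = p.toNat := by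
    simp [List.length_take, List.length_drop]
    omega
  have hdne : (b.drop i).take p.toNat ≠ [] := by
    intro he
    rw [he] at hdlen
    simp at hdlen
    omega
  obtain ⟨v, hv⟩ : ∃ v, PySem.List.min? ((b.drop i).take p.toNat) (fun x => x) = some v := by
    cases hmv : PySem.List.min? ((b.drop i).take p.toNat) (fun x => x) with
    | none => exact absurd ((PySem.List.min?_eq_none_iff _ _).mp hmv) hdne
    | some v => exact ⟨v, rfl⟩
  have hvmem : v ∈ (b.drop i).take p.toNat := PySem.List.min?_mem hv
  obtain ⟨k, hk⟩ : ∃ k, PySem.List.index? ((b.drop i).take p.toNat) v = some k := by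
    cases hik : PySem.List.index? ((b.drop i).take p.toNat) v with
    | none => exact absurd hvmem ((PySem.List.index?_eq_none_iff _ _).mp hik)
    | some k => exact ⟨k, rfl⟩
  obtain ⟨hklt, hdk, hbefore⟩ := PySem.List.getElem_of_index?_eq_some hk
  have hgd : ∀ (t : Nat) (ht : t < p.toNat),
      ((b.drop i).take p.toNat)[t]'(by omega) = b.getD (i + t) 0 := by
    intro t ht
    have hbt : i + t < b.length := by omega
    rw [List.getElem_take, List.getElem_drop]
    rw [List.getD_eq_getElem b 0 hbt]
  have hklt' : k < p.toNat := by omega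
  have hmin := PySem.List.min?_isMin hv
  have hamin : i + k = amin (fun t => b.getD t 0) i p.toNat := by
    apply amin_unique (fun t => b.getD t 0) p.toNat i (i + k) (by omega) (by omega) (by omega)
    · intro t ht1 ht2
      have ht' : t - i < p.toNat := by omega
      have h1 : b.getD (i + k) 0 = v := by rw [← hgd k hklt', hdk]
      have h2 : b.getD t 0 = ((b.drop i).take p.toNat)[t - i]'(by omega) := by
        rw [hgd (t - i) ht']
        congr 1
        omega
      simp only [h1, h2]
      exact hmin _ (List.getElem_mem _)
    · intro t ht1 ht2
      have ht' : t - i < k := by omega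
      have h1 : b.getD (i + k) 0 = v := by rw [← hgd k hklt', hdk]
      have h2 : b.getD t 0 = ((b.drop i).take p.toNat)[t - i]'(by omega) := by
        rw [hgd (t - i) (by omega)]
        congr 1
        omega
      have hne := hbefore (t - i) ht'
      have hle := hmin (((b.drop i).take p.toNat)[t - i]'(by omega)) (List.getElem_mem _)
      simp only [h1, h2]
      omega
  refine ⟨v, k, by rw [hd]; exact hv, by rw [hd]; exact hk, hamin, ?_⟩
  have he : (i : Int) + (k : Int) = ((i + k : Nat) : Int) := by push_cast; ring
  rw [he, PySem.List.pyGet?_natCast]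
  rw [List.getElem?_eq_getElem (by omega)]
  rw [List.getD_eq_getElem b 0 (by omega)]

theorem loopA_stop (b : List Int) (p : Int) (fa : Nat) (i : Int) (acc : List (Int × Int))
    (h : ¬(i + p < (b.length : Int))) : get_local_mins_loopA b p fa i acc = acc := by
  cases fa with
  | zero => rfl
  | succ fa =>
    simp only [get_local_mins_loopA]
    rw [if_neg h]
    split <;> rfl

theorem bLoop_stop (b : List Int) (p : Nat) (fb : Nat) (i : Nat) (acc : List (Int × Int))
    (h : ¬(i + p < b.length)) : bLoop b p fb i acc = acc := by
  cases fb with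
  | zero => rfl
  | succ fb =>
    simp only [bLoop]
    rw [if_neg h]

theorem loops_eq (b : List Int) (p : Int) (hp : 1 ≤ p) :
    ∀ (K i fa fb : Nat) (acc : List (Int × Int)), b.length - i ≤ K →
      b.length - i ≤ fa → b.length - i ≤ fb →
      get_local_mins_loopA b p fa (i : Int) acc = bLoop b p.toNat fb i acc := by
  intro K
  induction K with
  | zero =>
    intro i fa fb acc hK hfa hfb
    have h1 : ¬((i : Int) + p < (b.length : Int)) := by omega
    have h2 : ¬(i + p.toNat < b.length) := by omega
    rw [loopA_stop b p fa _ _ h1, bLoop_stop b p.toNat fb _ _ h2]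
  | succ K ih =>
    intro i fa fb acc hK hfa hfb
    by_cases hw : i + p.toNat < b.length
    · have hwI : (i : Int) + p < (b.length : Int) := by omega
      obtain ⟨fa', rfl⟩ : ∃ fa', fa = fa' + 1 := ⟨fa - 1, by omega⟩
      obtain ⟨fb', rfl⟩ : ∃ fb', fb = fb' + 1 := ⟨fb - 1, by omega⟩
      obtain ⟨v, k, h1, h2, h3, h4⟩ := aStep b p hp i hwI
      have hm := bStep b p.toNat (by omega) i hw
      have hub := amin_ub (fun t => b.getD t 0) p.toNat i (by omega)
      have hlb := amin_lb (fun t => b.getD t 0) p.toNat i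
      simp only [get_local_mins_loopA, bLoop]
      rw [if_pos (show (i : Int) ≤ (b.length : Int) by omega), if_pos hwI, if_pos hw]
      rw [hm]
      split
      next heq => rw [h1] at heq; cases heq
      next v' heq =>
        rw [h1] at heq
        injection heq with hv
        subst hv
        split
        next heq2 => rw [h2] at heq2; cases heq2
        next k' heq2 =>
          rw [h2] at heq2
          injection heq2 with hk
          subst hk
          split
          next heq3 => rw [h4] at heq3; cases heq3
          next bv heq3 =>
            rw [h4] at heq3
            injection heq3 with hbv
            subst hbv
            have hik : (i : Int) + (k : Int) = ((amin (fun t => b.getD t 0) i p.toNat : Nat) : Int) := by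
              rw [← h3]; push_cast; ring
            have hik1 : (i : Int) + (k : Int) + 1 = ((amin (fun t => b.getD t 0) i p.toNat + 1 : Nat) : Int) := by
              rw [← h3]; push_cast; ring
            rw [hik1, hik, h3]
            exact ih (amin (fun t => b.getD t 0) i p.toNat + 1) fa' fb' _ (by omega) (by omega) (by omega)
    · have h1 : ¬((i : Int) + p < (b.length : Int)) := by omega
      rw [loopA_stop b p fa _ _ h1, bLoop_stop b p.toNat fb _ _ hw]

theorem get_local_mins_spec : Claim_equal_get_local_mins := by
  intro b p _ hpre
  unfold Spec_get_local_mins get_local_mins get_local_mins_alt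
  by_cases hg : p < 1 ∨ (b.length : Int) ≤ p
  · rw [if_pos hg]
    have hnp : ¬((0 : Int) + p < (b.length : Int)) := by
      unfold Pre_get_local_mins at hpre
      omega
    exact loopA_stop b p _ 0 [] hnp
  · rw [if_neg hg]
    simp only [not_or, not_lt, not_le] at hg
    have h0 : ((0 : Nat) : Int) = (0 : Int) := by norm_num
    rw [← h0]
    exact loops_eq b p hg.1 b.length 0 (b.length + 1) b.length [] (by omega) (by omega) (by omega)
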